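-- pv_equiv track=rewrite | github.com/Macorov/University_Practice | practice77.py | last_vowel
-- ===== SOURCE A (Python) =====
-- def last_vowel(word):
--     vlst = ("a", "e", "i", "o", "u")
--     final = ""
--     if len(word) <2:
--         return word
--     elif word[-1] in vlst:
--         final = "yay" + word
--         return final
--     else:
--         count = 0
--         lim = len(word) -1
--         final = word[-1]
--         for elm in word:
--             if count != lim:
--                final += elm
--             else:
--                 final += "ay"
--             count += 1
--         return final
-- ===== SOURCE B (Python) =====
-- def last_vowel(word):
--     vlst = ("a", "e", "i", "o", "u")
--     if len(word) < 2:
--         return word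
--     if word[-1] in vlst:
--         return "yay" + word
--     return word[-1] + word[:-1] + "ay"
-- ===== Notes on version B (the rewrite author's own statement) =====
-- stated objective: simpler
-- what changed: The counter-driven for-loop that rebuilds the word character by character (replacing the final character with the suffix) is replaced by a single closed-form expression out of the last character, a slice of the rest, and the suffix.
import Mathlib
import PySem

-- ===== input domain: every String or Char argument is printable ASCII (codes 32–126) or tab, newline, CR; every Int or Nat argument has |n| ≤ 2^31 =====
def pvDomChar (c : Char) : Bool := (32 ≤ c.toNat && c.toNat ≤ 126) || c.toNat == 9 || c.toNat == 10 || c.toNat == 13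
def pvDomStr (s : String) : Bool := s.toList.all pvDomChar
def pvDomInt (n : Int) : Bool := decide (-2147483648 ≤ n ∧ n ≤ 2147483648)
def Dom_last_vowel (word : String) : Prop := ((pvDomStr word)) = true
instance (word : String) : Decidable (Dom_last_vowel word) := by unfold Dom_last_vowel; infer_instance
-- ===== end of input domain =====

-- B replaces A's counter-driven character loop with the closed form word[-1] + word[:-1] + "ay" (simpler).

-- ===== PORT A =====
-- the for-loop of A: 'for elm in word: if count != lim: final += elm else: final += "ay"; count += 1'
def lastVowelLoop (lim : Nat) : List Char → Nat → List Char → List Char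
  | [], _, acc => acc
  | c :: rest, count, acc =>
      if count ≠ lim then lastVowelLoop lim rest (count + 1) (acc ++ [c])
      else lastVowelLoop lim rest (count + 1) (acc ++ ['a', 'y'])

def last_vowel (word : String) : String :=
  let cs := word.toList
  if cs.length < 2 then word
  else
    match PySem.Chars.pyGet? cs (-1) with
    | none => word  -- unreachable: len(word) ≥ 2
    | some last =>
      if last ∈ ['a', 'e', 'i', 'o', 'u'] then String.ofList (['y', 'a', 'y'] ++ cs)
      else
        let lim := cs.length - 1
        String.ofList (lastVowelLoop lim cs 0 [last])

-- ===== PORT B =====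
def last_vowel_alt (word : String) : String :=
  let cs := word.toList
  if cs.length < 2 then word
  else
    match PySem.Chars.pyGet? cs (-1) with
    | none => word  -- unreachable: len(word) ≥ 2
    | some last =>
      if last ∈ ['a', 'e', 'i', 'o', 'u'] then String.ofList (['y', 'a', 'y'] ++ cs)
      else String.ofList (last :: PySem.List.slice cs none (some (-1)) ++ ['a', 'y'])

-- ===== PRECONDITION & SPEC =====
def Spec_last_vowel (word : String) (out : String) : Prop := out = last_vowel_alt word
instance (word : String) (out : String) : Decidable (Spec_last_vowel word out) := by unfold Spec_last_vowel; infer_instance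

-- ===== CLAIM (what is proved, stated in full; the proofs are below) =====
def Claim_equal_last_vowel : Prop := ∀ (word : String), Dom_last_vowel word → Spec_last_vowel word (last_vowel word)

-- ===== LEMMAS AND PROOFS =====
theorem lastVowelLoop_spec (lim : Nat) :
    ∀ (cs : List Char) (count : Nat) (acc : List Char), cs ≠ [] →
      count + cs.length = lim + 1 →
      lastVowelLoop lim cs count acc = acc ++ cs.dropLast ++ ['a', 'y'] := by
  intro cs
  induction cs with
  | nil => intro _ _ h; exact absurd rfl h
  | cons c rest ih =>
    intro count acc _ hlen
    rcases List.eq_nil_or_concat' rest with h | _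
    · subst h
      simp at hlen
      simp [lastVowelLoop, hlen]
    · have hne : rest ≠ [] := by rintro rfl; simp_all
      have hcount : count ≠ lim := by
        have : 1 ≤ rest.length := List.length_pos_iff.mpr hne
        simp at hlen; omega
      have hdl : (c :: rest).dropLast = c :: rest.dropLast := List.dropLast_cons_of_ne_nil hne
      simp only [lastVowelLoop, if_pos hcount]
      rw [ih (count + 1) (acc ++ [c]) hne (by simp at hlen ⊢; omega), hdl]
      simp

-- ===== VERDICT (by name: the statement is the Claim_ definition above) =====
theorem last_vowel_spec : Claim_equal_last_vowel := by
  intro word _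
  unfold Spec_last_vowel last_vowel last_vowel_alt
  set cs := word.toList with hcs
  by_cases hlen : cs.length < 2
  · simp [hlen]
  · simp only [if_neg hlen]
    match h : PySem.Chars.pyGet? cs (-1) with
    | none => rfl
    | some last =>
      by_cases hv : last ∈ ['a', 'e', 'i', 'o', 'u']
      · simp [hv]
      · simp only [if_neg hv]
        rw [lastVowelLoop_spec (cs.length - 1) cs 0 [last]
            (by intro hnil; simp [hnil] at hlen) (by omega),
            PySem.List.slice_to_neg_one]
        simp
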